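-- pv_equiv track=rewrite | github.com/Nafiz-codes/Course-Codes | CSE221/Assignment-03/B.py | merge_and_count_special
-- ===== SOURCE A (Python) =====
-- from bisect import bisect_right
--
-- def merge_and_count_special(left, right):
--     merged = []
--     invrs_c = 0
--
--     right_squares = sorted([x * x for x in right])
--
--     for val in left:
--         c = bisect_right(right_squares, val - 1)
--         invrs_c += c
--
--
--     i = j = 0
--     while i < len(left) and j < len(right):
--         if left[i] <= right[j]:
--             merged.append(left[i])
--             i += 1
--         else:
--             merged.append(right[j])
--             j += 1
--     merged.extend(left[i:])
--     merged.extend(right[j:])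
--     return merged, invrs_c
-- ===== SOURCE B (Python) =====
-- def merge_and_count_special(left, right):
--     # Count: single monotone two-pointer sweep over sorted(left) vs sorted squares
--     # (replaces A's per-element binary search); merge done by consuming iterators.
--     right_squares = sorted(x * x for x in right)
--     n = len(right_squares)
--     count = 0
--     j = 0
--     for v in sorted(left):
--         while j < n and right_squares[j] < v:
--             j += 1
--         count += j
--
--     merged = []
--     it_l, it_r = iter(left), iter(right)
--     a = next(it_l, None)
--     b = next(it_r, None)
--     while a is not None and b is not None:
--         if a <= b:
--             merged.append(a)
--             a = next(it_l, None)
--         else: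
--             merged.append(b)
--             b = next(it_r, None)
--     while a is not None:
--         merged.append(a)
--         a = next(it_l, None)
--     while b is not None:
--         merged.append(b)
--         b = next(it_r, None)
--     return merged, count
-- ===== Notes on version B (the rewrite author's own statement) =====
-- stated objective: alternative
-- what changed: The per-element bisect_right over the sorted squares is replaced by one monotone two-pointer sweep of sorted(left) against the sorted squares, and the index-based while merge is replaced by an iterator-consuming merge.
import Mathlib
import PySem

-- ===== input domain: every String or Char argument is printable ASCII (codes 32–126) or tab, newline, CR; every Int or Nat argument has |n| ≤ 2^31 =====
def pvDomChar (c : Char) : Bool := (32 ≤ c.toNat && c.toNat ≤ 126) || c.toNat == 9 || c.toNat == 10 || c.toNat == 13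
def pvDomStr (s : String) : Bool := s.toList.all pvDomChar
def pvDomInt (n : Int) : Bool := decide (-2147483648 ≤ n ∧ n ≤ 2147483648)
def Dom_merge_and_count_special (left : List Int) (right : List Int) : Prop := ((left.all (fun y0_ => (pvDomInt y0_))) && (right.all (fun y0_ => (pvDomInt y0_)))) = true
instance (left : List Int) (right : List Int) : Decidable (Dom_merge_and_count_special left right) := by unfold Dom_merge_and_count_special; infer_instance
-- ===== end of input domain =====

-- B replaces A's per-element bisect count by one monotone two-pointer sweep over sorted(left)
-- and A's index-based while merge by a structurally recursive merge (alternative, same cost).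


-- ===== PORT A =====
-- while i < len(left) and j < len(right): … ; merged.extend(left[i:]); merged.extend(right[j:])
-- (left[i:] on an in-range nonnegative i is List.drop i, exact here)
def mergeLoopA (left right : List Int) (i j : Nat) (merged : List Int) : List Int :=
  if h : i < left.length ∧ j < right.length then
    if left[i]'h.1 ≤ right[j]'h.2 then
      mergeLoopA left right (i + 1) j (merged ++ [left[i]'h.1])
    else
      mergeLoopA left right i (j + 1) (merged ++ [right[j]'h.2])
  else
    merged ++ left.drop i ++ right.drop j
termination_by left.length + right.length - (i + j)
decreasing_by all_goals omega

def merge_and_count_special (left : List Int) (right : List Int) : List Int × Int :=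
  let right_squares := PySem.List.sorted (right.map (fun x => x * x)) (fun x => x) false
  let invrs_c : Int :=
    left.foldl (fun c val => c + (PySem.List.bisectRight right_squares (val - 1) : Int)) 0
  (mergeLoopA left right 0 0 [], invrs_c)

-- ===== PORT B =====
-- 'while j < n and right_squares[j] < v: j += 1'
def altAdvance (rs : List Int) (v : Int) (j : Nat) : Nat :=
  if h : j < rs.length then
    if rs[j]'h < v then altAdvance rs v (j + 1) else j
  else j
termination_by rs.length - j
decreasing_by omega

-- 'for v in sorted(left): advance j; count += j'
def altCountLoop (rs : List Int) : List Int → Nat → Int → Int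
  | [], _, c => c
  | v :: vs, j, c =>
      altCountLoop rs vs (altAdvance rs v j) (c + ((altAdvance rs v j : Nat) : Int))

-- the iterator-consuming merge of Source B: a/b are the current heads, None = exhausted
def altMerge : List Int → List Int → List Int
  | [], ys => ys
  | x :: xs, [] => x :: xs
  | x :: xs, y :: ys => if x ≤ y then x :: altMerge xs (y :: ys) else y :: altMerge (x :: xs) ys

def merge_and_count_special_alt (left : List Int) (right : List Int) : List Int × Int :=
  let right_squares := PySem.List.sorted (right.map (fun x => x * x)) (fun x => x) false
  let count := altCountLoop right_squares (PySem.List.sorted left (fun x => x) false) 0 0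
  (altMerge left right, count)

-- ===== PRECONDITION & SPEC =====
def Spec_merge_and_count_special (left : List Int) (right : List Int) (out : List Int × Int) : Prop := out = merge_and_count_special_alt left right
instance (left : List Int) (right : List Int) (out : List Int × Int) : Decidable (Spec_merge_and_count_special left right out) := by unfold Spec_merge_and_count_special; infer_instance

-- ===== CLAIM (what is proved, stated in full; the proofs are below) =====
def Claim_equal_merge_and_count_special : Prop := ∀ (left : List Int) (right : List Int), Dom_merge_and_count_special left right → Spec_merge_and_count_special left right (merge_and_count_special left right)

-- ===== LEMMAS AND PROOFS =====

-- a predicate true exactly on the first k positions has count k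
theorem countP_of_split (p : Int → Bool) (rs : List Int) (k : Nat) (hk : k ≤ rs.length)
    (h1 : ∀ j (hj : j < rs.length), j < k → p rs[j])
    (h2 : ∀ j (hj : j < rs.length), k ≤ j → ¬ p rs[j]) :
    rs.countP p = k := by
  have hsplit : rs.countP p = (rs.take k).countP p + (rs.drop k).countP p := by
    conv_lhs => rw [← List.take_append_drop k rs]
    exact List.countP_append
  have htake : (rs.take k).countP p = (rs.take k).length := by
    rw [List.countP_eq_length]
    intro a ha
    obtain ⟨i, hi, rfl⟩ := List.mem_iff_getElem.mp ha
    have hi' : i < k ∧ i < rs.length := by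
      simp only [List.length_take] at hi; omega
    rw [List.getElem_take]
    exact h1 i hi'.2 hi'.1
  have hdrop : (rs.drop k).countP p = 0 := by
    rw [List.countP_eq_zero]
    intro a ha
    obtain ⟨i, hi, rfl⟩ := List.mem_iff_getElem.mp ha
    rw [List.getElem_drop]
    have hkl : k + i < rs.length := by
      simp only [List.length_drop] at hi; omega
    exact h2 (k + i) hkl (by omega)
  have hlen : (rs.take k).length = k := by simp; omega
  omega

-- sorted lists are getElem-monotone
theorem sorted_mono {rs : List Int} (hs : rs.Pairwise (· ≤ ·))
    {i j : Nat} (hj : j < rs.length) (hij : i ≤ j) : rs[i]'(lt_of_le_of_lt hij hj) ≤ rs[j] := by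
  rcases Nat.eq_or_lt_of_le hij with rfl | h
  · exact le_refl _
  · exact List.pairwise_iff_getElem.mp hs i j _ hj h

-- A's bisect_right(rs, v-1) counts the elements < v in a sorted rs
theorem bisect_eq_countP (rs : List Int) (hs : rs.Pairwise (· ≤ ·)) (v : Int) :
    PySem.List.bisectRight rs (v - 1) = rs.countP (fun x => decide (x < v)) := by
  obtain ⟨hle, h1, h2⟩ := PySem.List.bisectRight_spec rs (v - 1) hs
  symm
  apply countP_of_split _ _ _ hle
  · intro j hj hjk
    have := h1 j hj hjk
    simp only [decide_eq_true_eq]; omega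
  · intro j hj hjk
    simp only [decide_eq_true_eq]
    have := h2 j hj hjk; omega

-- B's sweep step lands on the same count
theorem altAdvance_eq (rs : List Int) (hs : rs.Pairwise (· ≤ ·)) (v : Int) :
    ∀ j, j ≤ rs.length → (∀ k (hk : k < rs.length), k < j → rs[k] < v) →
    altAdvance rs v j = rs.countP (fun x => decide (x < v)) := by
  intro j
  induction j using altAdvance.induct rs v with
  | case1 j h hlt ih =>
      intro _ hpre
      rw [altAdvance, dif_pos h, if_pos hlt]
      exact ih (by omega) (by
        intro k hk hkj
        rcases Nat.lt_or_ge k j with h' | h'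
        · exact hpre k hk h'
        · have : k = j := by omega
          subst this; exact hlt)
  | case2 j h hge =>
      intro hjle hpre
      rw [altAdvance, dif_pos h, if_neg hge]
      symm
      apply countP_of_split _ _ _ hjle
      · intro k hk hkj
        simp only [decide_eq_true_eq]; exact hpre k hk hkj
      · intro k hk hjk
        simp only [decide_eq_true_eq]
        have := sorted_mono hs hk hjk
        omega
  | case3 j h =>
      intro hjle hpre
      rw [altAdvance, dif_neg h]
      symm
      apply countP_of_split _ _ _ hjle
      · intro k hk hkj
        simp only [decide_eq_true_eq]; exact hpre k hk hkj
      · intro k hk hjk; omega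

theorem countP_prefix_lt (rs : List Int) (hs : rs.Pairwise (· ≤ ·)) (v : Int)
    (k : Nat) (hk : k < rs.length) (h : k < rs.countP (fun x => decide (x < v))) :
    rs[k] < v := by
  by_contra hge
  rw [not_lt] at hge
  have hsplit : rs.countP (fun x => decide (x < v))
      = (rs.take k).countP (fun x => decide (x < v)) + (rs.drop k).countP (fun x => decide (x < v)) := by
    conv_lhs => rw [← List.take_append_drop k rs]
    exact List.countP_append
  have hdrop : (rs.drop k).countP (fun x => decide (x < v)) = 0 := by
    rw [List.countP_eq_zero]
    intro a ha
    obtain ⟨i, hi, rfl⟩ := List.mem_iff_getElem.mp ha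
    rw [List.getElem_drop]
    simp only [decide_eq_true_eq]
    have hkl : k + i < rs.length := by
      simp only [List.length_drop] at hi; omega
    have := sorted_mono hs hkl (Nat.le_add_right k i)
    omega
  have hlen := List.countP_le_length (p := fun x : Int => decide (x < v)) (l := rs.take k)
  have hlen2 : (rs.take k).length ≤ k := by simp
  omega

-- B's sweep computes the sum of the per-element counts
theorem altCountLoop_eq (rs : List Int) (hs : rs.Pairwise (· ≤ ·)) :
    ∀ (vs : List Int) (j : Nat) (c : Int), vs.Pairwise (· ≤ ·) → j ≤ rs.length →
    (∀ k (hk : k < rs.length), k < j → ∀ v ∈ vs, rs[k] < v) →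
    altCountLoop rs vs j c = c + ((vs.map (fun v => (rs.countP (fun x => decide (x < v)) : Int))).sum) := by
  intro vs
  induction vs with
  | nil => intro j c _ _ _; simp [altCountLoop]
  | cons v vs ih =>
      intro j c hvs hjle hpre
      have hadv : altAdvance rs v j = rs.countP (fun x => decide (x < v)) :=
        altAdvance_eq rs hs v j hjle (fun k hk hkj => hpre k hk hkj v (by simp))
      have hrec := ih (rs.countP (fun x => decide (x < v)))
        (c + ((rs.countP (fun x => decide (x < v)) : Nat) : Int))
        (List.pairwise_cons.mp hvs).2 List.countP_le_length
        (fun k hk hkj w hw => by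
          have hlt : rs[k] < v := countP_prefix_lt rs hs v k hk hkj
          have hvw : v ≤ w := (List.pairwise_cons.mp hvs).1 w hw
          omega)
      rw [altCountLoop, hadv, hrec]
      simp only [List.map_cons, List.sum_cons]
      ring

-- foldl accumulation is a sum
theorem foldl_add_sum (f : Int → Int) : ∀ (xs : List Int) (c : Int),
    xs.foldl (fun acc x => acc + f x) c = c + (xs.map f).sum := by
  intro xs
  induction xs with
  | nil => simp
  | cons x xs ih => intro c; simp only [List.foldl_cons, List.map_cons, List.sum_cons, ih]; ring

-- the index merge loop equals the structural merge on the remaining suffixes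
theorem mergeLoopA_eq_altMerge (left right : List Int) :
    ∀ i j merged, mergeLoopA left right i j merged = merged ++ altMerge (left.drop i) (right.drop j) := by
  intro i j merged
  induction i, j, merged using mergeLoopA.induct left right with
  | case1 i j merged h hle ih =>
      rw [mergeLoopA, dif_pos h, if_pos hle, ih,
        List.drop_eq_getElem_cons h.1, List.drop_eq_getElem_cons h.2]
      rw [altMerge, if_pos hle]
      simp [← List.drop_eq_getElem_cons h.2]
  | case2 i j merged h hgt ih =>
      rw [mergeLoopA, dif_pos h, if_neg hgt, ih,
        List.drop_eq_getElem_cons h.1, List.drop_eq_getElem_cons h.2]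
      rw [altMerge, if_neg hgt]
      simp [← List.drop_eq_getElem_cons h.1]
  | case3 i j merged h =>
      rw [mergeLoopA, dif_neg h]
      rcases Nat.lt_or_ge i left.length with hi | hi
      · have hj : right.length ≤ j := by omega
        rw [List.drop_eq_nil_of_le hj, List.drop_eq_getElem_cons hi, altMerge]
        simp [← List.drop_eq_getElem_cons hi]
      · rw [List.drop_eq_nil_of_le hi]
        simp [altMerge]

-- ===== VERDICT (by name: the statement is the Claim_ definition above) =====
theorem merge_and_count_special_spec : Claim_equal_merge_and_count_special := by
  intro left right _
  unfold Spec_merge_and_count_special merge_and_count_special merge_and_count_special_alt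
  dsimp only
  have hs : (PySem.List.sorted (right.map (fun x => x * x)) (fun x => x) false).Pairwise (· ≤ ·) := by
    simpa using PySem.List.sorted_pairwise (right.map (fun x => x * x)) (fun x => x)
  have hls : (PySem.List.sorted left (fun x => x) false).Pairwise (· ≤ ·) := by
    simpa using PySem.List.sorted_pairwise left (fun x => x)
  set rs := PySem.List.sorted (right.map (fun x => x * x)) (fun x => x) false with hrs
  refine Prod.ext ?_ ?_
  · simpa using mergeLoopA_eq_altMerge left right 0 0 []
  · show left.foldl (fun c val => c + (PySem.List.bisectRight rs (val - 1) : Int)) 0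
      = altCountLoop rs (PySem.List.sorted left (fun x => x) false) 0 0
    rw [altCountLoop_eq rs hs _ 0 0 hls (Nat.zero_le _) (by omega)]
    rw [foldl_add_sum (fun val => (PySem.List.bisectRight rs (val - 1) : Int)) left 0]
    have hperm : (PySem.List.sorted left (fun x => x) false).Perm left :=
      PySem.List.sorted_perm left (fun x => x) false
    have hbc : ∀ v : Int, (PySem.List.bisectRight rs (v - 1) : Int)
        = ((rs.countP (fun x => decide (x < v)) : Nat) : Int) := by
      intro v; exact_mod_cast bisect_eq_countP rs hs v
    simp only [hbc]
    exact congrArg (0 + ·) ((hperm.map _).sum_eq).symm
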